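-- pv_equiv track=rewrite | github.com/jsampson/iit-thesis | run.py | extract_set_instructions
-- ===== SOURCE A (Python) =====
-- def extract_set_instructions(instructions):
--     set_instructions = []
--     rest_instructions = []
--     in_sets = True
--     for instruction in instructions:
--         if in_sets and instruction.startswith("SET"):
--             set_instructions.append(instruction)
--         else:
--             in_sets = False
--             rest_instructions.append(instruction)
--     return set_instructions, rest_instructions
-- ===== SOURCE B (Python) =====
-- def extract_set_instructions(instructions):
--     items = list(instructions)
--     i = 0
--     n = len(items)
--     while i < n and items[i].startswith("SET"):
--         i += 1
--     return items[:i], items[i:]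
-- ===== Notes on version B (the rewrite author's own statement) =====
-- stated objective: simpler
-- what changed: Replaces the sticky boolean flag and two parallel append loops by computing the length of the leading SET run with an index while-loop and returning the two slices.
import Mathlib
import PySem

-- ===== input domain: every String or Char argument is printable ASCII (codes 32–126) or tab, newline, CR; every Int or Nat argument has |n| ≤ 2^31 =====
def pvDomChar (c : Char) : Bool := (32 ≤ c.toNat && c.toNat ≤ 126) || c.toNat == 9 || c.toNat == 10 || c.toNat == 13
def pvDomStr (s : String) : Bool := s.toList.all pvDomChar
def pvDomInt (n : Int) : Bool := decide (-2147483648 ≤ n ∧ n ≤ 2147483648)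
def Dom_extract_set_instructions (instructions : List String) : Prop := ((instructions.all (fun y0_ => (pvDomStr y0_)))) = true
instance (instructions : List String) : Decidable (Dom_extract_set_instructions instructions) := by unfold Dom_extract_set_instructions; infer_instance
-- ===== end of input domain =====

-- ===== PORT A =====
-- B computes the leading-SET run length and slices, instead of A's flag + two append loops.
def extract_set_instructions (instructions : List String) : List String × List String :=
  let r := instructions.foldl
    (fun (st : List String × List String × Bool) instruction =>
      if st.2.2 && PySem.Str.startswith instruction "SET" then
        (st.1 ++ [instruction], st.2.1, st.2.2)
      else
        (st.1, st.2.1 ++ [instruction], false))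
    ([], [], true)
  (r.1, r.2.1)

-- ===== PORT B =====
-- the while loop of Source B: count leading items starting with "SET"
def setRunLen : List String → Nat
  | [] => 0
  | x :: xs => if PySem.Str.startswith x "SET" then setRunLen xs + 1 else 0

def extract_set_instructions_alt (instructions : List String) : List String × List String :=
  let i := setRunLen instructions
  (instructions.take i, instructions.drop i)

-- ===== PRECONDITION & SPEC =====
def Spec_extract_set_instructions (instructions : List String) (out : List String × List String) : Prop := out = extract_set_instructions_alt instructions
instance (instructions : List String) (out : List String × List String) : Decidable (Spec_extract_set_instructions instructions out) := by unfold Spec_extract_set_instructions; infer_instance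

-- ===== CLAIM (what is proved, stated in full; the proofs are below) =====
def Claim_equal_extract_set_instructions : Prop := ∀ (instructions : List String), Dom_extract_set_instructions instructions → Spec_extract_set_instructions instructions (extract_set_instructions instructions)

-- ===== LEMMAS AND PROOFS =====

theorem foldA_false (l sets rest : List String) :
    l.foldl
      (fun (st : List String × List String × Bool) instruction =>
        if st.2.2 && PySem.Str.startswith instruction "SET" then
          (st.1 ++ [instruction], st.2.1, st.2.2)
        else
          (st.1, st.2.1 ++ [instruction], false))
      (sets, rest, false)
    = (sets, rest ++ l, false) := by
  induction l generalizing rest with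
  | nil => simp
  | cons x xs ih =>
    rw [List.foldl_cons]
    simp only [Bool.false_and, Bool.false_eq_true, if_false, ih]
    simp

theorem foldA_true (l sets rest : List String) :
    l.foldl
      (fun (st : List String × List String × Bool) instruction =>
        if st.2.2 && PySem.Str.startswith instruction "SET" then
          (st.1 ++ [instruction], st.2.1, st.2.2)
        else
          (st.1, st.2.1 ++ [instruction], false))
      (sets, rest, true)
    = (sets ++ l.take (setRunLen l), rest ++ l.drop (setRunLen l), true) ∨
    l.foldl
      (fun (st : List String × List String × Bool) instruction =>
        if st.2.2 && PySem.Str.startswith instruction "SET" then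
          (st.1 ++ [instruction], st.2.1, st.2.2)
        else
          (st.1, st.2.1 ++ [instruction], false))
      (sets, rest, true)
    = (sets ++ l.take (setRunLen l), rest ++ l.drop (setRunLen l), false) := by
  induction l generalizing sets rest with
  | nil => left; simp
  | cons x xs ih =>
    rw [List.foldl_cons]
    by_cases h : PySem.Str.startswith x "SET" = true
    · have h' : PySem.Chars.startswith x.toList ['S','E','T'] = true ↔ True := by
        constructor <;> intro _ <;> [trivial; simpa using h]
      rw [Bool.true_and, if_pos h]
      rcases ih (sets ++ [x]) rest with h2 | h2 <;>
        [left; right] <;> rw [h2] <;> simp [setRunLen, h']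
    · have h'' : PySem.Chars.startswith x.toList ['S','E','T'] = true ↔ False := by
        constructor <;> intro hc
        · exact h (by simpa using hc)
        · exact hc.elim
      rw [Bool.true_and, if_neg h, foldA_false]
      right; simp [setRunLen, h'']

-- ===== VERDICT (by name: the statement is the Claim_ definition above) =====
theorem extract_set_instructions_spec : Claim_equal_extract_set_instructions := by
  intro instructions _
  unfold Spec_extract_set_instructions
  unfold extract_set_instructions extract_set_instructions_alt
  rcases foldA_true instructions [] [] with h | h <;> rw [h] <;> simp
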